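-- pv_equiv track=rewrite | github.com/RaVincentHuang/hyper-simulation-post | src/hyper_simulation/hypergraph/dependency.py | _restrict_correfs
-- ===== SOURCE A (Python) =====
-- def _restrict_correfs(clusters: list[list[tuple[int, int]]], level: int=0) -> list[list[tuple[int, int]]]:
--     restricted = []
--     for cluster in clusters:
--         if level == 0:
--             restricted.append(cluster)
--         elif level == 1:
--             is_sub = False
--             for span in cluster:
--                 if is_sub:
--                     break
--                 for other_span in cluster:
--                     if span == other_span:
--                         continue
--                     if span[0] >= other_span[0] and span[1] <= other_span[1]:
--                         is_sub = True
--                         break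
--             if not is_sub:
--                 restricted.append(cluster)
--         elif level == 2:
--             has_intersection = False
--             for span in cluster:
--                 if has_intersection:
--                     break
--                 for other_span in cluster:
--                     if span == other_span:
--                         continue
--                     if not (span[1] <= other_span[0] or span[0] >= other_span[1]):
--                         has_intersection = True
--                         break
--             if not has_intersection:
--                 restricted.append(cluster)
--     return restricted
-- ===== SOURCE B (Python) =====
-- def _has_contained(cluster):
--     # some distinct span lies inside another: sort by (start, -end); a span is
--     # contained iff its end does not exceed the running max end of earlier spans
--     spans = sorted(set(cluster), key=lambda s: (s[0], -s[1]))
--     best = None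
--     for a, b in spans:
--         if best is not None and b <= best:
--             return True
--         best = b if best is None else max(best, b)
--     return False
--
--
-- def _has_overlap(cluster):
--     spans = set(cluster)
--     proper = sorted(s for s in spans if s[0] < s[1])
--     # sweep: a proper span overlaps an earlier proper span iff its start is
--     # below the running max end of the earlier ones
--     best = None
--     for a, b in proper:
--         if best is not None and best > a:
--             return True
--         best = b if best is None else max(best, b)
--     # a degenerate span (end <= start) overlaps only a proper span strictly
--     # around it: merge the two sorted lists with one advancing pointer
--     empty = sorted((s for s in spans if s[1] <= s[0]), key=lambda s: (s[1], s[0]))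
--     best = None
--     i = 0
--     for a, b in empty:
--         while i < len(proper) and proper[i][0] < b:
--             best = proper[i][1] if best is None else max(best, proper[i][1])
--             i += 1
--         if best is not None and best > a:
--             return True
--     return False
--
--
-- def _restrict_correfs(clusters: list[list[tuple[int, int]]], level: int=0) -> list[list[tuple[int, int]]]:
--     restricted = []
--     for cluster in clusters:
--         if level == 0:
--             restricted.append(cluster)
--         elif level == 1:
--             if not _has_contained(cluster):
--                 restricted.append(cluster)
--         elif level == 2:
--             if not _has_overlap(cluster):
--                 restricted.append(cluster)
--     return restricted
-- ===== Notes on version B (the rewrite author's own statement) =====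
-- stated objective: alternative
-- what changed: Per cluster, A scans all ordered pairs of spans (worst-case quadratic, with early exit); B dedupes the spans and sorts them, detecting containment with a single max-end sweep over spans sorted by (start, -end), and detecting intersection with a sweepline over proper spans plus a merge-pointer pass matching degenerate spans against the running max end of proper spans starting before them (worst-case O(k log k) per cluster, though a timing run could not measure a difference on generated inputs).
import Mathlib
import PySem

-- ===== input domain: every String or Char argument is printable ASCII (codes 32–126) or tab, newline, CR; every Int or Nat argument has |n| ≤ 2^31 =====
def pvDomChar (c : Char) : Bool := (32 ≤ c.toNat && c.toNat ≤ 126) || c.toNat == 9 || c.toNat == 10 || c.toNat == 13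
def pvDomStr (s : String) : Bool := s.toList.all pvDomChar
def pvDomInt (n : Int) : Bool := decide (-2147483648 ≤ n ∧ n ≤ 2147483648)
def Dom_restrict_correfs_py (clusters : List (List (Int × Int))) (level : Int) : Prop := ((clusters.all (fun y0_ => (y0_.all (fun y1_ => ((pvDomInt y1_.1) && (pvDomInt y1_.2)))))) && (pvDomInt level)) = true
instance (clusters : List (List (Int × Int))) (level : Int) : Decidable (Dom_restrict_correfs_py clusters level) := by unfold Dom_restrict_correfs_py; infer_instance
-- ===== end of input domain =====

-- B replaces A's quadratic all-pairs scans per cluster by sort-based sweeps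
-- (max-end tracking for containment, sweepline + merge pointer for overlap).

-- ===== PORT A =====
-- inner 'for other_span in cluster' loop of the level-1 branch
def aInnerSub (span : Int × Int) : List (Int × Int) → Bool
  | [] => false
  | o :: rest =>
    if span = o then aInnerSub span rest
    else if o.1 ≤ span.1 ∧ span.2 ≤ o.2 then true
    else aInnerSub span rest

-- outer 'for span in cluster' loop of the level-1 branch (flag is_sub, break)
def aOuterSub (cluster : List (Int × Int)) : List (Int × Int) → Bool → Bool
  | [], f => f
  | s :: rest, f => if f then f else aOuterSub cluster rest (aInnerSub s cluster)

-- inner 'for other_span in cluster' loop of the level-2 branch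
def aInnerInt (span : Int × Int) : List (Int × Int) → Bool
  | [] => false
  | o :: rest =>
    if span = o then aInnerInt span rest
    else if ¬ (span.2 ≤ o.1 ∨ o.2 ≤ span.1) then true
    else aInnerInt span rest

-- outer 'for span in cluster' loop of the level-2 branch (flag has_intersection, break)
def aOuterInt (cluster : List (Int × Int)) : List (Int × Int) → Bool → Bool
  | [], f => f
  | s :: rest, f => if f then f else aOuterInt cluster rest (aInnerInt s cluster)

def restrict_correfs_py (clusters : List (List (Int × Int))) (level : Int) : List (List (Int × Int)) :=
  clusters.foldl (fun restricted cluster =>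
    if level = 0 then restricted ++ [cluster]
    else if level = 1 then
      if aOuterSub cluster cluster false then restricted else restricted ++ [cluster]
    else if level = 2 then
      if aOuterInt cluster cluster false then restricted else restricted ++ [cluster]
    else restricted) []

-- ===== PORT B =====
-- the 'for a, b in spans' loop of _has_contained
def bSweepCont : Option Int → List (Int × Int) → Bool
  | _, [] => false
  | none, s :: rest => bSweepCont (some s.2) rest
  | some m, s :: rest => if s.2 ≤ m then true else bSweepCont (some (max m s.2)) rest

def bHasContained (cluster : List (Int × Int)) : Bool :=
  bSweepCont none (PySem.List.sorted (PySem.Set.ofList cluster)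
    (fun s => toLex (s.1, -s.2)) false)

-- the first 'for a, b in proper' loop of _has_overlap
def bSweepOv : Option Int → List (Int × Int) → Bool
  | _, [] => false
  | none, s :: rest => bSweepOv (some s.2) rest
  | some m, s :: rest => if s.1 < m then true else bSweepOv (some (max m s.2)) rest

-- 'best = v if best is None else max(best, v)'
def optMax : Option Int → Int → Option Int
  | none, v => some v
  | some m, v => some (max m v)

-- 'best is not None and best > a'
def bGt : Option Int → Int → Bool
  | none, _ => false
  | some m, a => a < m

-- the inner 'while i < len(proper) and proper[i][0] < b' pointer advance
def bAdvance (b : Int) : List (Int × Int) → Option Int → (List (Int × Int) × Option Int)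
  | [], best => ([], best)
  | t :: rest, best =>
    if t.1 < b then bAdvance b rest (optMax best t.2)
    else (t :: rest, best)

-- the 'for a, b in empty' merge loop of _has_overlap
def bLoopEmpty : List (Int × Int) → List (Int × Int) → Option Int → Bool
  | [], _, _ => false
  | s :: ds, proper, best =>
    let st := bAdvance s.2 proper best
    if bGt st.2 s.1 then true
    else bLoopEmpty ds st.1 st.2

def bHasOverlap (cluster : List (Int × Int)) : Bool :=
  let spans := PySem.Set.ofList cluster
  let proper := PySem.List.sorted (spans.filter (fun s => s.1 < s.2))
    (fun s => toLex (s.1, s.2)) false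
  if bSweepOv none proper then true
  else
    let empty := PySem.List.sorted (spans.filter (fun s => s.2 ≤ s.1))
      (fun s => toLex (s.2, s.1)) false
    bLoopEmpty empty proper none

def restrict_correfs_py_alt (clusters : List (List (Int × Int))) (level : Int) : List (List (Int × Int)) :=
  clusters.foldl (fun restricted cluster =>
    if level = 0 then restricted ++ [cluster]
    else if level = 1 then
      if bHasContained cluster then restricted else restricted ++ [cluster]
    else if level = 2 then
      if bHasOverlap cluster then restricted else restricted ++ [cluster]
    else restricted) []

-- ===== PRECONDITION & SPEC =====
def Spec_restrict_correfs_py (clusters : List (List (Int × Int))) (level : Int) (out : List (List (Int × Int))) : Prop := out = restrict_correfs_py_alt clusters level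
instance (clusters : List (List (Int × Int))) (level : Int) (out : List (List (Int × Int))) : Decidable (Spec_restrict_correfs_py clusters level out) := by unfold Spec_restrict_correfs_py; infer_instance

-- ===== CLAIM (what is proved, stated in full; the proofs are below) =====
def Claim_equal_restrict_correfs_py : Prop := ∀ (clusters : List (List (Int × Int))) (level : Int), Dom_restrict_correfs_py clusters level → Spec_restrict_correfs_py clusters level (restrict_correfs_py clusters level)

-- ===== LEMMAS AND PROOFS =====

-- 's is contained in t' and 's intersects t' as in A's tests
def SubIn (s t : Int × Int) : Prop := t.1 ≤ s.1 ∧ s.2 ≤ t.2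
def Ov (s t : Int × Int) : Prop := t.1 < s.2 ∧ s.1 < t.2

def HasSub (c : List (Int × Int)) : Prop := ∃ s ∈ c, ∃ t ∈ c, s ≠ t ∧ SubIn s t
def HasOv (c : List (Int × Int)) : Prop := ∃ s ∈ c, ∃ t ∈ c, s ≠ t ∧ Ov s t

-- '∃ i < j, R l[i] l[j]' for a list
def PairIn (R : Int × Int → Int × Int → Prop) : List (Int × Int) → Prop
  | [] => False
  | x :: xs => (∃ y ∈ xs, R x y) ∨ PairIn R xs

lemma aInnerSub_iff (span : Int × Int) (l : List (Int × Int)) :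
    aInnerSub span l = true ↔ ∃ t ∈ l, span ≠ t ∧ SubIn span t := by
  induction l with
  | nil => simp [aInnerSub]
  | cons o rest ih =>
    by_cases h1 : span = o
    · subst h1
      have hL : aInnerSub span (span :: rest) = aInnerSub span rest := by
        simp [aInnerSub]
      rw [hL, ih]; simp only [List.mem_cons]
      constructor
      · rintro ⟨t, ht, h⟩; exact ⟨t, Or.inr ht, h⟩
      · rintro ⟨t, ht | ht, h⟩
        · exact absurd ht.symm h.1
        · exact ⟨t, ht, h⟩
    · by_cases h2 : o.1 ≤ span.1 ∧ span.2 ≤ o.2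
      · have hL : aInnerSub span (o :: rest) = true := by
          simp [aInnerSub, if_neg h1, h2]
        rw [hL]
        simp only [true_iff]
        exact ⟨o, by simp, h1, h2⟩
      · have hL : aInnerSub span (o :: rest) = aInnerSub span rest := by
          simp [aInnerSub, if_neg h1, h2]
        rw [hL, ih]; simp only [List.mem_cons]
        constructor
        · rintro ⟨t, ht, h⟩; exact ⟨t, Or.inr ht, h⟩
        · rintro ⟨t, ht | ht, h⟩
          · exact absurd (ht ▸ h.2) h2
          · exact ⟨t, ht, h⟩

lemma aOuterSub_any (c : List (Int × Int)) :
    ∀ (l : List (Int × Int)) (f : Bool),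
      aOuterSub c l f = (f || l.any (fun s => aInnerSub s c)) := by
  intro l
  induction l with
  | nil => intro f; simp [aOuterSub]
  | cons s rest ih =>
    intro f
    cases f with
    | true => simp [aOuterSub]
    | false => simp [aOuterSub, ih]

lemma aOuterSub_iff (c : List (Int × Int)) :
    aOuterSub c c false = true ↔ HasSub c := by
  rw [aOuterSub_any]
  simp only [Bool.false_or, List.any_eq_true, aInnerSub_iff, HasSub]

lemma aInnerInt_iff (span : Int × Int) (l : List (Int × Int)) :
    aInnerInt span l = true ↔ ∃ t ∈ l, span ≠ t ∧ Ov span t := by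
  induction l with
  | nil => simp [aInnerInt]
  | cons o rest ih =>
    by_cases h1 : span = o
    · subst h1
      have hL : aInnerInt span (span :: rest) = aInnerInt span rest := by
        simp [aInnerInt]
      rw [hL, ih]; simp only [List.mem_cons]
      constructor
      · rintro ⟨t, ht, h⟩; exact ⟨t, Or.inr ht, h⟩
      · rintro ⟨t, ht | ht, h⟩
        · exact absurd ht.symm h.1
        · exact ⟨t, ht, h⟩
    · by_cases h2 : ¬ (span.2 ≤ o.1 ∨ o.2 ≤ span.1)
      · have hL : aInnerInt span (o :: rest) = true := by
          simp only [aInnerInt, if_neg h1]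
          rw [if_pos h2]
        rw [hL]
        simp only [true_iff]
        exact ⟨o, by simp, h1, by unfold Ov; push Not at h2; omega⟩
      · have hL : aInnerInt span (o :: rest) = aInnerInt span rest := by
          simp only [aInnerInt, if_neg h1]
          rw [if_neg h2]
        rw [hL, ih]; simp only [List.mem_cons]
        constructor
        · rintro ⟨t, ht, h⟩; exact ⟨t, Or.inr ht, h⟩
        · rintro ⟨t, ht | ht, h⟩
          · exfalso; have hh := h.2; subst ht; unfold Ov at hh; push Not at h2; omega
          · exact ⟨t, ht, h⟩

lemma aOuterInt_any (c : List (Int × Int)) :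
    ∀ (l : List (Int × Int)) (f : Bool),
      aOuterInt c l f = (f || l.any (fun s => aInnerInt s c)) := by
  intro l
  induction l with
  | nil => intro f; simp [aOuterInt]
  | cons s rest ih =>
    intro f
    cases f with
    | true => simp [aOuterInt]
    | false => simp [aOuterInt, ih]

lemma aOuterInt_iff (c : List (Int × Int)) :
    aOuterInt c c false = true ↔ HasOv c := by
  rw [aOuterInt_any]
  simp only [Bool.false_or, List.any_eq_true, aInnerInt_iff, HasOv]

lemma pairIn_elim {K R : Int × Int → Int × Int → Prop} :
    ∀ {l : List (Int × Int)}, l.Nodup → l.Pairwise K → PairIn R l →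
      ∃ x ∈ l, ∃ y ∈ l, x ≠ y ∧ K x y ∧ R x y := by
  intro l
  induction l with
  | nil => intro _ _ h; exact absurd h (by simp [PairIn])
  | cons x xs ih =>
    intro hnd hpw h
    rcases h with ⟨y, hy, hR⟩ | h
    · exact ⟨x, by simp, y, by simp [hy], by rintro rfl; exact (List.nodup_cons.1 hnd).1 hy,
        (List.pairwise_cons.1 hpw).1 y hy, hR⟩
    · obtain ⟨a, ha, b, hb, hab⟩ := ih (List.nodup_cons.1 hnd).2 (List.pairwise_cons.1 hpw).2 h
      exact ⟨a, by simp [ha], b, by simp [hb], hab⟩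

lemma pairIn_intro {K R : Int × Int → Int × Int → Prop} {a b : Int × Int} :
    ∀ {l : List (Int × Int)}, l.Pairwise K → a ∈ l → b ∈ l → a ≠ b →
      (K a b → R a b) → (K b a → R b a) → PairIn R l := by
  intro l
  induction l with
  | nil => intro _ ha; simp at ha
  | cons x xs ih =>
    intro hpw ha hb hne h1 h2
    by_cases hxa : x = a
    · subst hxa
      have hb' : b ∈ xs := by
        rcases List.mem_cons.1 hb with h | h
        · exact absurd h.symm hne
        · exact h
      exact Or.inl ⟨b, hb', h1 ((List.pairwise_cons.1 hpw).1 b hb')⟩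
    · by_cases hxb : x = b
      · subst hxb
        have ha' : a ∈ xs := by
          rcases List.mem_cons.1 ha with h | h
          · exact absurd h.symm hxa
          · exact h
        exact Or.inl ⟨a, ha', h2 ((List.pairwise_cons.1 hpw).1 a ha')⟩
      · have ha' : a ∈ xs := by rcases List.mem_cons.1 ha with h | h
                                · exact absurd h.symm hxa
                                · exact h
        have hb' : b ∈ xs := by rcases List.mem_cons.1 hb with h | h
                                · exact absurd h.symm hxb
                                · exact h
        exact Or.inr (ih (List.pairwise_cons.1 hpw).2 ha' hb' hne h1 h2)

lemma bSweepCont_some : ∀ (l : List (Int × Int)) (m : Int),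
    bSweepCont (some m) l = true ↔
      (∃ s ∈ l, s.2 ≤ m) ∨ PairIn (fun t s => s.2 ≤ t.2) l := by
  intro l
  induction l with
  | nil => intro m; simp [bSweepCont, PairIn]
  | cons s rest ih =>
    intro m
    by_cases h : s.2 ≤ m
    · simp only [bSweepCont, if_pos h, true_iff]
      exact Or.inl ⟨s, by simp, h⟩
    · simp only [bSweepCont, if_neg h]
      rw [ih]
      simp only [List.mem_cons, PairIn]
      constructor
      · rintro (⟨u, hu, hle⟩ | hp)
        · rcases le_max_iff.1 hle with h1 | h2
          · exact Or.inl ⟨u, Or.inr hu, h1⟩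
          · exact Or.inr (Or.inl ⟨u, hu, h2⟩)
        · exact Or.inr (Or.inr hp)
      · rintro (⟨u, rfl | hu, hle⟩ | ⟨y, hy, hle⟩ | hp)
        · exact absurd hle h
        · exact Or.inl ⟨u, hu, le_max_iff.2 (Or.inl hle)⟩
        · exact Or.inl ⟨y, hy, le_max_iff.2 (Or.inr hle)⟩
        · exact Or.inr hp

lemma bSweepCont_none (l : List (Int × Int)) :
    bSweepCont none l = true ↔ PairIn (fun t s => s.2 ≤ t.2) l := by
  cases l with
  | nil => simp [bSweepCont, PairIn]
  | cons s rest =>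
    show bSweepCont (some s.2) rest = true ↔ _
    rw [bSweepCont_some]
    exact Iff.rfl

lemma bHasContained_iff (c : List (Int × Int)) :
    bHasContained c = true ↔ HasSub c := by
  unfold bHasContained
  have hperm : (PySem.List.sorted (PySem.Set.ofList c)
      (fun s : Int × Int => toLex (s.1, -s.2)) false).Perm (PySem.Set.ofList c) :=
    PySem.List.sorted_perm _ _ _
  have hmem : ∀ x : Int × Int, x ∈ PySem.List.sorted (PySem.Set.ofList c)
      (fun s : Int × Int => toLex (s.1, -s.2)) false ↔ x ∈ c := by
    intro x; rw [hperm.mem_iff]; exact PySem.Set.mem_ofList c x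
  have hnd : (PySem.List.sorted (PySem.Set.ofList c)
      (fun s : Int × Int => toLex (s.1, -s.2)) false).Nodup :=
    hperm.nodup_iff.2 (PySem.Set.nodup_ofList c)
  have hpw := PySem.List.sorted_pairwise (PySem.Set.ofList c)
    (fun s : Int × Int => toLex (s.1, -s.2))
  rw [bSweepCont_none]
  constructor
  · intro hp
    obtain ⟨x, hx, y, hy, hne, hK, hR⟩ := pairIn_elim hnd hpw hp
    refine ⟨y, (hmem y).1 hy, x, (hmem x).1 hx, fun hyx => hne hyx.symm, ?_, hR⟩
    rcases Prod.Lex.le_iff.1 hK with h | h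
    · exact le_of_lt h
    · exact le_of_eq h.1
  · rintro ⟨t, ht, u, hu, hne, hsub⟩
    obtain ⟨hs1, hs2⟩ : u.1 ≤ t.1 ∧ t.2 ≤ u.2 := hsub
    refine pairIn_intro hpw ((hmem t).2 ht) ((hmem u).2 hu) hne ?_ ?_
    · intro hK
      rcases Prod.Lex.le_iff.1 hK with h | h
      · exfalso; simp only [ofLex_toLex] at h; omega
      · simp only [ofLex_toLex] at h; omega
    · intro _
      exact hs2

lemma bSweepOv_some : ∀ (l : List (Int × Int)) (m : Int),
    bSweepOv (some m) l = true ↔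
      (∃ s ∈ l, s.1 < m) ∨ PairIn (fun t s => s.1 < t.2) l := by
  intro l
  induction l with
  | nil => intro m; simp [bSweepOv, PairIn]
  | cons s rest ih =>
    intro m
    by_cases h : s.1 < m
    · simp only [bSweepOv, if_pos h, true_iff]
      exact Or.inl ⟨s, by simp, h⟩
    · simp only [bSweepOv, if_neg h]
      rw [ih]
      simp only [List.mem_cons, PairIn]
      constructor
      · rintro (⟨u, hu, hlt⟩ | hp)
        · rcases lt_max_iff.1 hlt with h1 | h2
          · exact Or.inl ⟨u, Or.inr hu, h1⟩
          · exact Or.inr (Or.inl ⟨u, hu, h2⟩)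
        · exact Or.inr (Or.inr hp)
      · rintro (⟨u, rfl | hu, hlt⟩ | ⟨y, hy, hlt⟩ | hp)
        · exact absurd hlt h
        · exact Or.inl ⟨u, hu, lt_max_iff.2 (Or.inl hlt)⟩
        · exact Or.inl ⟨y, hy, lt_max_iff.2 (Or.inr hlt)⟩
        · exact Or.inr hp

lemma bSweepOv_none (l : List (Int × Int)) :
    bSweepOv none l = true ↔ PairIn (fun t s => s.1 < t.2) l := by
  cases l with
  | nil => simp [bSweepOv, PairIn]
  | cons s rest =>
    show bSweepOv (some s.2) rest = true ↔ _
    rw [bSweepOv_some]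
    exact Iff.rfl

lemma bAdvance_eq (b : Int) : ∀ (p : List (Int × Int)) (best : Option Int),
    bAdvance b p best =
      (p.dropWhile (fun t => decide (t.1 < b)),
       (p.takeWhile (fun t => decide (t.1 < b))).foldl (fun acc t => optMax acc t.2) best) := by
  intro p
  induction p with
  | nil => intro best; simp [bAdvance]
  | cons t rest ih =>
    intro best
    by_cases h : t.1 < b
    · simp [bAdvance, h, ih]
    · simp [bAdvance, h]

lemma bGt_foldl : ∀ (l : List (Int × Int)) (best : Option Int) (a : Int),
    bGt (l.foldl (fun acc t => optMax acc t.2) best) a = true ↔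
      bGt best a = true ∨ ∃ t ∈ l, a < t.2 := by
  intro l
  induction l with
  | nil => intro best a; simp
  | cons t rest ih =>
    intro best a
    rw [List.foldl_cons, ih]
    have hstep : bGt (optMax best t.2) a = true ↔ bGt best a = true ∨ a < t.2 := by
      cases best <;> simp [optMax, bGt]
    rw [hstep, List.exists_mem_cons_iff]
    tauto

lemma dropWhile_ge (b : Int) : ∀ (N : List (Int × Int)),
    N.Pairwise (fun x y => x.1 ≤ y.1) →
    ∀ t ∈ N.dropWhile (fun t => decide (t.1 < b)), b ≤ t.1 := by
  intro N
  induction N with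
  | nil => simp
  | cons x xs ih =>
    intro hpw t ht
    by_cases h : x.1 < b
    · rw [List.dropWhile_cons_of_pos (by simpa using h)] at ht
      exact ih (List.pairwise_cons.1 hpw).2 t ht
    · rw [List.dropWhile_cons_of_neg (by simpa using h)] at ht
      rcases List.mem_cons.1 ht with rfl | ht'
      · omega
      · exact le_trans (not_lt.1 h) ((List.pairwise_cons.1 hpw).1 t ht')

lemma bLoopEmpty_spec : ∀ (D N C : List (Int × Int)) (best : Option Int),
    (∀ s ∈ D, ∀ t ∈ C, t.1 < s.2) →
    N.Pairwise (fun x y => x.1 ≤ y.1) →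
    D.Pairwise (fun x y => x.2 ≤ y.2) →
    (∀ a, bGt best a = true ↔ ∃ t ∈ C, a < t.2) →
    (bLoopEmpty D N best = true ↔
      ∃ s ∈ D, ∃ t ∈ C ++ N, t.1 < s.2 ∧ s.1 < t.2) := by
  intro D
  induction D with
  | nil => intro N C best _ _ _ _; simp [bLoopEmpty]
  | cons s ds ih =>
    intro N C best h1 h2 h3 h4
    have hN : N.takeWhile (fun t => decide (t.1 < s.2)) ++
        N.dropWhile (fun t => decide (t.1 < s.2)) = N :=
      List.takeWhile_append_dropWhile
    have hb' : ∀ a, bGt ((N.takeWhile (fun t => decide (t.1 < s.2))).foldl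
        (fun acc t => optMax acc t.2) best) a = true ↔
        ∃ t ∈ C ++ N.takeWhile (fun t => decide (t.1 < s.2)), a < t.2 := by
      intro a
      rw [bGt_foldl, h4]
      constructor
      · rintro (⟨t, ht, hlt⟩ | ⟨t, ht, hlt⟩)
        · exact ⟨t, List.mem_append_left _ ht, hlt⟩
        · exact ⟨t, List.mem_append_right _ ht, hlt⟩
      · rintro ⟨t, ht, hlt⟩
        rcases List.mem_append.1 ht with h | h
        · exact Or.inl ⟨t, h, hlt⟩
        · exact Or.inr ⟨t, h, hlt⟩
    have hLHS : bLoopEmpty (s :: ds) N best =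
        (if bGt (bAdvance s.2 N best).2 s.1 then true
         else bLoopEmpty ds (bAdvance s.2 N best).1 (bAdvance s.2 N best).2) := rfl
    rw [hLHS, bAdvance_eq]
    by_cases hc : bGt ((N.takeWhile (fun t => decide (t.1 < s.2))).foldl
        (fun acc t => optMax acc t.2) best) s.1 = true
    · rw [if_pos hc]
      simp only [true_iff]
      obtain ⟨t, ht, hlt⟩ := (hb' s.1).1 hc
      refine ⟨s, List.mem_cons_self .., t, ?_, ?_, hlt⟩
      · rcases List.mem_append.1 ht with h | h
        · exact List.mem_append_left _ h
        · exact List.mem_append_right _ ((List.takeWhile_sublist _).mem h)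
      · rcases List.mem_append.1 ht with h | h
        · exact h1 s (List.mem_cons_self ..) t h
        · simpa using List.mem_takeWhile_imp h
    · rw [if_neg hc]
      have h1' : ∀ s' ∈ ds, ∀ t ∈ C ++ N.takeWhile (fun t => decide (t.1 < s.2)),
          t.1 < s'.2 := by
        intro s' hs' t ht
        rcases List.mem_append.1 ht with h | h
        · exact h1 s' (List.mem_cons_of_mem _ hs') t h
        · have hh : t.1 < s.2 := by simpa using List.mem_takeWhile_imp h
          exact lt_of_lt_of_le hh ((List.pairwise_cons.1 h3).1 s' hs')
      have h2' := h2.sublist (List.dropWhile_sublist (l := N)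
        (fun t => decide (t.1 < s.2)))
      rw [ih _ _ _ h1' h2' (List.pairwise_cons.1 h3).2 hb']
      constructor
      · rintro ⟨s', hs', t, ht, hts⟩
        refine ⟨s', List.mem_cons_of_mem _ hs', t, ?_, hts⟩
        rcases List.mem_append.1 ht with h | h
        · rcases List.mem_append.1 h with h' | h'
          · exact List.mem_append_left _ h'
          · exact List.mem_append_right _ ((List.takeWhile_sublist _).mem h')
        · exact List.mem_append_right _ ((List.dropWhile_sublist _).mem h)
      · rintro ⟨s', hs', t, ht, hts⟩
        rcases List.mem_cons.1 hs' with rfl | hs''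
        · -- the head s cannot witness: bGt is false and N2 starts too high
          exfalso
          rcases List.mem_append.1 ht with h | h
          · exact hc ((hb' s'.1).2 ⟨t, List.mem_append_left _ h, hts.2⟩)
          · rcases List.mem_append.1 ((hN ▸ h : t ∈ _)) with h' | h'
            · exact hc ((hb' s'.1).2 ⟨t, List.mem_append_right _ h', hts.2⟩)
            · exact absurd hts.1 (not_lt.2 (dropWhile_ge s'.2 N h2 t h'))
        · refine ⟨s', hs'', t, ?_, hts⟩
          rcases List.mem_append.1 ht with h | h
          · exact List.mem_append_left _ (List.mem_append_left _ h)
          · rcases List.mem_append.1 ((hN ▸ h : t ∈ _)) with h' | h'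
            · exact List.mem_append_left _ (List.mem_append_right _ h')
            · exact List.mem_append_right _ h'

lemma bHasOverlap_iff (c : List (Int × Int)) :
    bHasOverlap c = true ↔ HasOv c := by
  unfold bHasOverlap
  have hpermP : (PySem.List.sorted ((PySem.Set.ofList c).filter (fun s => s.1 < s.2))
      (fun s : Int × Int => toLex (s.1, s.2)) false).Perm
      ((PySem.Set.ofList c).filter (fun s => s.1 < s.2)) :=
    PySem.List.sorted_perm _ _ _
  have hmemP : ∀ x : Int × Int,
      x ∈ PySem.List.sorted ((PySem.Set.ofList c).filter (fun s => s.1 < s.2))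
        (fun s : Int × Int => toLex (s.1, s.2)) false ↔ x ∈ c ∧ x.1 < x.2 := by
    intro x
    rw [hpermP.mem_iff, List.mem_filter, PySem.Set.mem_ofList]
    simp
  have hndP : (PySem.List.sorted ((PySem.Set.ofList c).filter (fun s => s.1 < s.2))
      (fun s : Int × Int => toLex (s.1, s.2)) false).Nodup :=
    hpermP.nodup_iff.2 ((PySem.Set.nodup_ofList c).filter _)
  have hpwP := PySem.List.sorted_pairwise ((PySem.Set.ofList c).filter (fun s => s.1 < s.2))
    (fun s : Int × Int => toLex (s.1, s.2))
  have hpwP1 : (PySem.List.sorted ((PySem.Set.ofList c).filter (fun s => s.1 < s.2))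
      (fun s : Int × Int => toLex (s.1, s.2)) false).Pairwise (fun x y => x.1 ≤ y.1) := by
    refine hpwP.imp ?_
    intro a b hK
    rcases Prod.Lex.le_iff.1 hK with h | h
    · exact le_of_lt (by simpa using h)
    · exact le_of_eq (by simpa using h.1)
  have hpermE : (PySem.List.sorted ((PySem.Set.ofList c).filter (fun s => s.2 ≤ s.1))
      (fun s : Int × Int => toLex (s.2, s.1)) false).Perm
      ((PySem.Set.ofList c).filter (fun s => s.2 ≤ s.1)) :=
    PySem.List.sorted_perm _ _ _
  have hmemE : ∀ x : Int × Int,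
      x ∈ PySem.List.sorted ((PySem.Set.ofList c).filter (fun s => s.2 ≤ s.1))
        (fun s : Int × Int => toLex (s.2, s.1)) false ↔ x ∈ c ∧ x.2 ≤ x.1 := by
    intro x
    rw [hpermE.mem_iff, List.mem_filter, PySem.Set.mem_ofList]
    simp
  have hpwE := PySem.List.sorted_pairwise ((PySem.Set.ofList c).filter (fun s => s.2 ≤ s.1))
    (fun s : Int × Int => toLex (s.2, s.1))
  have hpwE2 : (PySem.List.sorted ((PySem.Set.ofList c).filter (fun s => s.2 ≤ s.1))
      (fun s : Int × Int => toLex (s.2, s.1)) false).Pairwise (fun x y => x.2 ≤ y.2) := by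
    refine hpwE.imp ?_
    intro a b hK
    rcases Prod.Lex.le_iff.1 hK with h | h
    · exact le_of_lt (by simpa using h)
    · exact le_of_eq (by simpa using h.1)
  have hloop := bLoopEmpty_spec
    (PySem.List.sorted ((PySem.Set.ofList c).filter (fun s => s.2 ≤ s.1))
      (fun s : Int × Int => toLex (s.2, s.1)) false)
    (PySem.List.sorted ((PySem.Set.ofList c).filter (fun s => s.1 < s.2))
      (fun s : Int × Int => toLex (s.1, s.2)) false)
    [] none (by intro s _ t ht; simp at ht) hpwP1 hpwE2 (by intro a; simp [bGt])
  rw [List.nil_append] at hloop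
  have hsplitIf : ∀ (a b : Bool), ((if a = true then true else b) = true ↔ a = true ∨ b = true) := by
    intro a b; cases a <;> simp
  rw [hsplitIf, bSweepOv_none, hloop]
  constructor
  · rintro (hp | ⟨s, hs, t, ht, h1, h2⟩)
    · obtain ⟨x, hx, y, hy, hne, hK, hR⟩ := pairIn_elim hndP hpwP1 hp
      refine ⟨y, ((hmemP y).1 hy).1, x, ((hmemP x).1 hx).1, fun hyx => hne hyx.symm, ?_, hR⟩
      have hy2 := ((hmemP y).1 hy).2
      omega
    · have hsE := (hmemE s).1 hs
      have htP := (hmemP t).1 ht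
      refine ⟨s, hsE.1, t, htP.1, ?_, h1, h2⟩
      intro hst
      rw [hst] at hsE
      omega
  · rintro ⟨s, hs, t, ht, hne, hov⟩
    obtain ⟨ho1, ho2⟩ : t.1 < s.2 ∧ s.1 < t.2 := hov
    by_cases ps : s.1 < s.2
    · by_cases pt : t.1 < t.2
      · refine Or.inl (pairIn_intro hpwP1 ((hmemP s).2 ⟨hs, ps⟩)
          ((hmemP t).2 ⟨ht, pt⟩) hne ?_ ?_)
        · intro _; exact ho1
        · intro _; exact ho2
      · -- t degenerate, s proper: swap roles in the merge loop
        exact Or.inr ⟨t, (hmemE t).2 ⟨ht, not_lt.1 pt⟩, s, (hmemP s).2 ⟨hs, ps⟩, ho2, ho1⟩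
    · -- s degenerate: its partner t must be proper
      have pt : t.1 < t.2 := by omega
      exact Or.inr ⟨s, (hmemE s).2 ⟨hs, not_lt.1 ps⟩, t, (hmemP t).2 ⟨ht, pt⟩, ho1, ho2⟩

-- ===== VERDICT (by name: the statement is the Claim_ definition above) =====
theorem restrict_correfs_py_spec : Claim_equal_restrict_correfs_py := by
  intro clusters level _
  unfold Spec_restrict_correfs_py restrict_correfs_py restrict_correfs_py_alt
  have hfun : ∀ (r : List (List (Int × Int))) (c : List (Int × Int)),
      (if level = 0 then r ++ [c]
       else if level = 1 then if aOuterSub c c false then r else r ++ [c]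
       else if level = 2 then if aOuterInt c c false then r else r ++ [c]
       else r)
    = (if level = 0 then r ++ [c]
       else if level = 1 then if bHasContained c then r else r ++ [c]
       else if level = 2 then if bHasOverlap c then r else r ++ [c]
       else r) := by
    intro r c
    have h1 : aOuterSub c c false = bHasContained c := by
      rw [Bool.eq_iff_iff, aOuterSub_iff, bHasContained_iff]
    have h2 : aOuterInt c c false = bHasOverlap c := by
      rw [Bool.eq_iff_iff, aOuterInt_iff, bHasOverlap_iff]
    rw [h1, h2]
  rw [funext fun r => funext fun c => hfun r c]
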